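-- pv_equiv track=rewrite | github.com/s-koide-dc/Design2Code | src/design_parser/design_inference.py | _remove_inference_metadata_block
-- ===== SOURCE A (Python) =====
-- def _remove_inference_metadata_block(content: str) -> str:
--     if "### Inference Metadata" not in content:
--         return content
--     lines = content.splitlines()
--     out = []
--     in_block = False
--     for line in lines:
--         if line.strip() == "### Inference Metadata":
--             in_block = True
--             continue
--         if in_block:
--             if line.strip().startswith("## ") or line.strip().startswith("### "):
--                 in_block = False
--                 out.append(line)
--             else:
--                 continue
--         else:
--             out.append(line)
--     return "\n".join(out)
-- ===== SOURCE B (Python) =====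
-- def _remove_inference_metadata_block(content: str) -> str:
--     if "### Inference Metadata" not in content:
--         return content
--     # Stage 1: split the lines into segments at every marker line (markers are dropped).
--     segments = []
--     cur = []
--     for line in content.splitlines():
--         if line.strip() == "### Inference Metadata":
--             segments.append(cur)
--             cur = []
--         else:
--             cur.append(line)
--     segments.append(cur)
--     # Stage 2: the first segment is kept whole; every later segment followed a marker,
--     # so drop its prefix up to (but not including) its first heading line.
--     out = segments[0]
--     for seg in segments[1:]:
--         out = out + _trim(seg)
--     return "\n".join(out)
--
--
-- def _trim(seg):
--     for k, line in enumerate(seg):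
--         s = line.strip()
--         if s.startswith("## ") or s.startswith("### "):
--             return seg[k:]
--     return []
-- ===== Notes on version B (the rewrite author's own statement) =====
-- stated objective: alternative
-- what changed: Replaces A's single stateful pass with an in_block flag by a two-stage decomposition: first split the lines into segments at the marker lines, then keep the first segment whole and trim each later segment to its suffix starting at its first heading line, concatenating the results.
import Mathlib
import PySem

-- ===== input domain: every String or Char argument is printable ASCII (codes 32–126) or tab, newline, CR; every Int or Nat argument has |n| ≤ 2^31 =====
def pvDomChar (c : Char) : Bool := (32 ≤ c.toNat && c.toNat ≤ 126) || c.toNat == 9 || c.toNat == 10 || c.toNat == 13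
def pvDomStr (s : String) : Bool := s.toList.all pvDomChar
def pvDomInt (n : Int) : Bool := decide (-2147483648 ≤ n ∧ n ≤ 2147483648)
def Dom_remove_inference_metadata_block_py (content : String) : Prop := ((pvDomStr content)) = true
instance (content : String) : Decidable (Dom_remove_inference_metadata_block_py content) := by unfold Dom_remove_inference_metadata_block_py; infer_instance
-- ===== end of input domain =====

-- B replaces A's single stateful pass (in_block flag) by two stages: split the lines into
-- segments at the marker lines, then trim each later segment to the suffix starting at its
-- first heading line (objective: alternative decomposition, same cost).

-- ===== PORT A =====
-- the body of A's for-loop, acting on the state (out, in_block)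
def rimStepA (st : List String × Bool) (line : String) : List String × Bool :=
  if PySem.Str.strip line == "### Inference Metadata" then (st.1, true)
  else if st.2 then
    if PySem.Str.startswith (PySem.Str.strip line) "## " ||
       PySem.Str.startswith (PySem.Str.strip line) "### " then (st.1 ++ [line], false)
    else st
  else (st.1 ++ [line], st.2)

def remove_inference_metadata_block_py (content : String) : String :=
  if PySem.Str.isIn "### Inference Metadata" content = false then content
  else
    let lines := PySem.Str.splitlines content
    let r := lines.foldl rimStepA ([], false)
    PySem.Str.join "\n" r.1

-- ===== PORT B =====
-- B's _trim helper: the suffix of seg starting at its first heading line ([] if none)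
def rimTrim : List String → List String
  | [] => []
  | line :: rest =>
    let s := PySem.Str.strip line
    if PySem.Str.startswith s "## " || PySem.Str.startswith s "### " then line :: rest
    else rimTrim rest

-- stage-1 loop body: split at marker lines, state (segments, cur)
def rimSegStep (st : List (List String) × List String) (line : String) : List (List String) × List String :=
  if PySem.Str.strip line == "### Inference Metadata" then (st.1 ++ [st.2], [])
  else (st.1, st.2 ++ [line])

def remove_inference_metadata_block_py_alt (content : String) : String :=
  if PySem.Str.isIn "### Inference Metadata" content = false then content
  else
    let r := (PySem.Str.splitlines content).foldl rimSegStep ([], [])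
    match r.1 ++ [r.2] with
    | s0 :: ss => PySem.Str.join "\n" (ss.foldl (fun o seg => o ++ rimTrim seg) s0)
    | [] => ""   -- unreachable: the segment list always has at least one element

-- ===== PRECONDITION & SPEC =====
def Spec_remove_inference_metadata_block_py (content : String) (out : String) : Prop := out = remove_inference_metadata_block_py_alt content
instance (content : String) (out : String) : Decidable (Spec_remove_inference_metadata_block_py content out) := by unfold Spec_remove_inference_metadata_block_py; infer_instance

-- ===== CLAIM (what is proved, stated in full; the proofs are below) =====
def Claim_equal_remove_inference_metadata_block_py : Prop := ∀ (content : String), Dom_remove_inference_metadata_block_py content → Spec_remove_inference_metadata_block_py content (remove_inference_metadata_block_py content)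

-- ===== LEMMAS AND PROOFS =====

-- abbreviations used only in the proofs
def rimIsMark (l : String) : Bool := PySem.Str.strip l == "### Inference Metadata"
def rimIsHdr (l : String) : Bool :=
  PySem.Str.startswith (PySem.Str.strip l) "## " || PySem.Str.startswith (PySem.Str.strip l) "### "

-- the value A's loop produces from state flag b on the remaining lines
def rimF : Bool → List String → List String
  | _, [] => []
  | b, line :: rest =>
    if rimIsMark line then rimF true rest
    else if b then (if rimIsHdr line then line :: rimF false rest else rimF true rest)
    else line :: rimF false rest

-- recursive form of B's stage-1 split (cur = current open segment)
def rimSegs (cur : List String) : List String → List (List String)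
  | [] => [cur]
  | line :: rest =>
    if rimIsMark line then cur :: rimSegs [] rest
    else rimSegs (cur ++ [line]) rest

-- B's stage-2 combination
def rimHead : List (List String) → List String
  | [] => []
  | s0 :: ss => s0 ++ ss.flatMap rimTrim

theorem rimLoopA_eq : ∀ (l out : List String) (b : Bool),
    (l.foldl rimStepA (out, b)).1 = out ++ rimF b l := by
  intro l
  induction l with
  | nil => intro out b; simp [rimF]
  | cons line rest ih =>
    intro out b
    simp only [List.foldl, rimStepA, rimF, rimIsMark, rimIsHdr]
    split_ifs <;> simp_all

theorem rimSegLoop_eq : ∀ (l : List String) (sa : List (List String)) (cur : List String),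
    (l.foldl rimSegStep (sa, cur)).1 ++ [(l.foldl rimSegStep (sa, cur)).2]
      = sa ++ rimSegs cur l := by
  intro l
  induction l with
  | nil => intro sa cur; simp [rimSegs]
  | cons line rest ih =>
    intro sa cur
    simp only [List.foldl, rimSegStep, rimSegs, rimIsMark]
    split_ifs <;> simp_all

theorem rimTrim_append (c x : List String) :
    rimTrim (c ++ x) = if rimTrim c = [] then rimTrim x else rimTrim c ++ x := by
  induction c with
  | nil => simp [rimTrim]
  | cons l tl ih =>
    simp only [List.cons_append, rimTrim]
    split_ifs with h <;> simp_all

-- the key invariant relating B's two stages to A's loop values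
theorem rimSegs_eq : ∀ (l : List String) (c : List String),
    rimHead (rimSegs c l) = c ++ rimF false l ∧
    (rimSegs c l).flatMap rimTrim
      = rimTrim c ++ (if rimTrim c = [] then rimF true l else rimF false l) := by
  intro l
  induction l with
  | nil =>
    intro c
    constructor
    · simp [rimSegs, rimHead, rimF]
    · simp only [rimSegs, List.flatMap_cons, List.flatMap_nil, List.append_nil, rimF]
      split_ifs with h <;> simp [h]
  | cons line rest ih =>
    intro c
    by_cases hm : rimIsMark line = true
    · have hb := (ih ([] : List String)).2
      simp only [rimTrim] at hb
      constructor
      · simp [rimSegs, hm, rimHead, rimF, hb]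
      · simp only [rimSegs, hm, if_pos, List.flatMap_cons, rimF, hb]
        split_ifs with h <;> simp [h]
    · have hsegs : rimSegs c (line :: rest) = rimSegs (c ++ [line]) rest := by
        simp [rimSegs, hm]
      have htl : rimTrim [line] = if rimIsHdr line = true then [line] else [] := by
        simp only [rimTrim, rimIsHdr]; split_ifs with h1 <;> simp_all
      by_cases hh : rimIsHdr line = true
      · constructor
        · rw [hsegs, (ih (c ++ [line])).1]
          simp [rimF, hm]
        · rw [hsegs, (ih (c ++ [line])).2, rimTrim_append, htl, if_pos hh]
          by_cases hc : rimTrim c = []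
          · simp [hc, rimF, hm, hh]
          · have hne : rimTrim c ++ [line] ≠ [] := by simp
            simp [hc, hne, rimF, hm]
      · constructor
        · rw [hsegs, (ih (c ++ [line])).1]
          simp [rimF, hm]
        · rw [hsegs, (ih (c ++ [line])).2, rimTrim_append, htl, if_neg hh]
          by_cases hc : rimTrim c = []
          · simp [hc, rimF, hm, hh]
          · have hne : rimTrim c ++ [line] ≠ [] := by simp
            simp [hc, hne, rimF, hm]

-- ===== VERDICT (by name: the statement is the Claim_ definition above) =====
theorem remove_inference_metadata_block_py_spec : Claim_equal_remove_inference_metadata_block_py := by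
  intro content _
  unfold Spec_remove_inference_metadata_block_py
  unfold remove_inference_metadata_block_py remove_inference_metadata_block_py_alt
  split_ifs with h
  · rfl
  · show PySem.Str.join "\n" (List.foldl rimStepA ([], false) (PySem.Str.splitlines content)).1 = _
    rw [rimLoopA_eq]
    have hseg := rimSegLoop_eq (PySem.Str.splitlines content) [] []
    simp only [List.nil_append] at hseg
    rcases hs : rimSegs [] (PySem.Str.splitlines content) with _ | ⟨s0, ss⟩
    · have := (rimSegs_eq (PySem.Str.splitlines content) []).1
      rw [hs] at this; simp [rimHead] at this
      -- rimSegs is never empty; derive the result from the head lemma anyway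
      exact absurd hs (by
        cases hl : PySem.Str.splitlines content <;> simp [rimSegs]
        intro h'; split at h' <;> simp_all)
    · rw [hs] at hseg
      simp only [hseg]
      have := (rimSegs_eq (PySem.Str.splitlines content) []).1
      rw [hs] at this
      simp only [rimHead, List.nil_append] at this
      rw [PySem.List.foldl_append_eq_flatMap]
      rw [this]
      simp
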